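-- pv_equiv track=rewrite | github.com/kim-jinseop/CodingTest | 프로그래머스/lv2/12913. 땅따먹기/땅따먹기.py | solution
-- ===== SOURCE A (Python) =====
-- def solution(land):
--     answer = 0
--
--     for idx in range(len(land)-1) :
--         #case1
--         mi = land[idx].index(max(land[idx]))
--         x = land[idx].pop(mi) # 1st
--         y = land[idx].pop(land[idx].index(max(land[idx]))) # 2en
--
--         for i in range(4) :
--             if i == mi :
--                 land[idx+1][i] += y
--             else :
--                 land[idx+1][i] += x
--
--     return max(land[len(land)-1])
-- ===== SOURCE B (Python) =====
-- def solution(land):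
--     dp = list(land[0])
--     for row in land[1:]:
--         dp = [row[j] + max(dp[k] for k in range(4) if k != j) for j in range(4)]
--     return max(dp)
-- ===== Notes on version B (the rewrite author's own statement) =====
-- stated objective: simpler
-- what changed: A destructively pops the max and second-max out of each row and patches the next row in place; B keeps a pure 4-element DP vector rebuilt per row as row[j] + max of the other columns, never mutating the argument.
-- outside the precondition, e.g. on solution([[1, 2, 3, 4, 5], [1, 2, 3, 4, 5]]): A returns 9, B returns 7; on solution([[1, 2], [1, 2, 3, 4]]): A returns 6, B raises IndexError; on solution([[1, 2, 3, 4], [1, 2]]): A raises IndexError, B raises IndexError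
import Mathlib
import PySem

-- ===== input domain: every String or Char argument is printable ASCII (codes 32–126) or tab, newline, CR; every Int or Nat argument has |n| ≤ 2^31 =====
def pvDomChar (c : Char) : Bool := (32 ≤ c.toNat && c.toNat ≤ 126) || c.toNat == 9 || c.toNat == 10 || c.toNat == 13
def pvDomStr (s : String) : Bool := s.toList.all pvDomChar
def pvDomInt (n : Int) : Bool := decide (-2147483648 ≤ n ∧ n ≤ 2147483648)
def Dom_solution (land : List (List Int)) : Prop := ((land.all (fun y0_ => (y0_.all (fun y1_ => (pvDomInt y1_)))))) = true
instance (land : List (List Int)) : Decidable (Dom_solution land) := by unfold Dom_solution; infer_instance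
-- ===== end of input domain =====

-- B replaces A's destructive find-max/second-max-and-pop pass with a pure DP vector rebuilt per row
-- (max over the other columns per cell). Equivalence is about the RETURN value only: A mutates `land`
-- in place (pops from each processed row, rewrites the next row), B never touches its argument.

-- ===== PORT A =====
-- one iteration of A's outer loop: mi = index of max, pop it (x), pop the new max (y),
-- then land[idx+1][i] += y if i == mi else x, for i in range(4).
-- the `none`/`.getD` fallbacks leave the state unchanged exactly where Python raises (outside Pre_).
def stepA (land : List (List Int)) (idx : Nat) : List (List Int) :=
  let row := land.getD idx []
  match PySem.List.max? row (fun v => v) with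
  | none => land
  | some m =>
    match PySem.List.index? row m with
    | none => land
    | some mi =>
      match PySem.List.pop? row (mi : Int) with
      | none => land
      | some (x, row1) =>
        match PySem.List.max? row1 (fun v => v) with
        | none => land
        | some m2 =>
          match PySem.List.index? row1 m2 with
          | none => land
          | some mi2 =>
            match PySem.List.pop? row1 (mi2 : Int) with
            | none => land
            | some (y, row2) =>
              let land1 := land.set idx row2
              let nxt := land1.getD (idx + 1) []
              let nxt := (List.range 4).foldl
                (fun nx i => nx.set i (nx.getD i 0 + (if i = mi then y else x))) nxt
              land1.set (idx + 1) nxt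

def solution (land : List (List Int)) : Int :=
  let final := (List.range (land.length - 1)).foldl stepA land
  ((PySem.List.max? (final.getD (land.length - 1) []) (fun v => v)).getD 0)

-- ===== PORT B =====
-- max(dp[k] for k in range(4) if k != j)
def bestOther (dp : List Int) (j : Nat) : Int :=
  ((PySem.List.max? (((List.range 4).filter (fun k => k ≠ j)).map (fun k => dp.getD k 0))
      (fun v => v)).getD 0)

-- dp = [row[j] + max(dp[k] for k in range(4) if k != j) for j in range(4)]
def stepB (dp row : List Int) : List Int :=
  (List.range 4).map (fun j => row.getD j 0 + bestOther dp j)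

def solution_alt (land : List (List Int)) : Int :=
  match land with
  | [] => 0
  | r0 :: rest =>
      ((PySem.List.max? (rest.foldl stepB r0) (fun v => v)).getD 0)

-- ===== PRECONDITION & SPEC =====
-- Pre_ is the problem's natural domain: a nonempty grid that, as soon as the DP loop actually runs
-- (2 or more rows), has exactly 4 columns per row. It excludes (a) inputs where A raises (empty land,
-- a processed row shorter than 2, a following row shorter than 4) and the malformed multi-row grids
-- with a too-short row on which A still returns but B's 4-column DP raises, and (b) multi-row grids
-- with a row wider than 4, on which A's pop-and-rewrite reads columns its range(4) loop never
-- updates, giving accidental values no caller of this 4-column puzzle would specify.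
def Pre_solution (land : List (List Int)) : Prop :=
  land ≠ [] ∧ (land.length = 1 → land.getD 0 [] ≠ []) ∧
    (1 < land.length → ∀ r ∈ land, r.length = 4)
instance (land : List (List Int)) : Decidable (Pre_solution land) := by
  unfold Pre_solution; infer_instance

def pvWitness_solution : List (List Int) := [[1, 2, 3, 5], [5, 6, 7, 8], [4, 3, 2, 1]]

def Spec_solution (land : List (List Int)) (out : Int) : Prop := out = solution_alt land
instance (land : List (List Int)) (out : Int) : Decidable (Spec_solution land out) := by
  unfold Spec_solution; infer_instance

-- ===== CLAIM (what is proved, stated in full; the proofs are below) =====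
def Claim_equal_solution : Prop :=
  ∀ (land : List (List Int)), Dom_solution land → Pre_solution land →
    Spec_solution land (solution land)

-- ===== LEMMAS AND PROOFS =====
theorem getD_set_ne {α} (l : List α) {i j : Nat} (v : α) (d : α) (h : i ≠ j) :
    (l.set i v).getD j d = l.getD j d := by
  simp [List.getD, List.getElem?_set_ne h]

theorem getD_set_self {α} (l : List α) {i : Nat} (v : α) (d : α) (h : i < l.length) :
    (l.set i v).getD i d = v := by
  simp [List.getD, h]

theorem pop_index_max (r : List Int) (hr : r ≠ []) :
    ∃ M2 mi2 rest, PySem.List.max? r (fun v => v) = some M2 ∧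
      PySem.List.index? r M2 = some mi2 ∧ PySem.List.pop? r (mi2 : Int) = some (M2, rest) := by
  obtain ⟨M2, hM2⟩ : ∃ M2, PySem.List.max? r (fun v => v) = some M2 := by
    cases h : PySem.List.max? r (fun v => v) with
    | none => exact absurd ((PySem.List.max?_eq_none_iff r _).mp h) hr
    | some m => exact ⟨m, rfl⟩
  have hmem : M2 ∈ r := PySem.List.max?_mem hM2
  obtain ⟨mi2, hmi2⟩ : ∃ mi2, PySem.List.index? r M2 = some mi2 := by
    have := PySem.List.index?_isSome_iff (xs := r) (v := M2)
    cases h : PySem.List.index? r M2 with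
    | none => rw [h] at this; simp at this; exact absurd hmem (by simp [this])
    | some k => exact ⟨k, rfl⟩
  obtain ⟨hk, hget, -⟩ := PySem.List.getElem_of_index?_eq_some hmi2
  exact ⟨M2, mi2, r.eraseIdx mi2, hM2, hmi2, by rw [PySem.List.pop?_natCast r mi2 hk, hget]⟩

theorem stepA_length (st : List (List Int)) (k : Nat) : (stepA st k).length = st.length := by
  unfold stepA
  dsimp only
  repeat' split
  all_goals simp

theorem stepA_getD_gt (st : List (List Int)) (k j : Nat) (h1 : j ≠ k) (h2 : j ≠ k + 1) :
    (stepA st k).getD j [] = st.getD j [] := by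
  unfold stepA
  dsimp only
  repeat' split
  all_goals try rfl
  all_goals rw [getD_set_ne _ _ _ (Ne.symm h2), getD_set_ne _ _ _ (Ne.symm h1)]

theorem stepA_next (st : List (List Int)) (k : Nat) (a b c d p q s t : Int)
    (hrow : st.getD k [] = [a, b, c, d]) (hnext : st.getD (k + 1) [] = [p, q, s, t])
    (hlen : k + 1 < st.length) :
    (stepA st k).getD (k + 1) [] = stepB [a, b, c, d] [p, q, s, t] := by
  have hset : ∀ r2 : List Int, ((st.set k r2).getD (k+1) []) = [p,q,s,t] := fun r2 => by
    rw [getD_set_ne _ _ _ (by omega), hnext]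
  unfold stepA
  dsimp only
  rw [hrow, PySem.List.max?_id_cons]
  by_cases h0 : b ≤ a ∧ c ≤ a ∧ d ≤ a
  · have hM : List.foldl max a [b,c,d] = a := by simp [List.foldl]; omega
    rw [hM]
    dsimp only
    rw [PySem.List.index?_cons_self]
    dsimp only
    simp only [Nat.cast_zero]
    rw [PySem.List.pop?_zero_cons]
    dsimp only
    obtain ⟨M2, mi2, rest, e1, e2, e3⟩ := pop_index_max [b,c,d] (by simp)
    have hM2 : M2 = max (max b c) d := by
      rw [PySem.List.max?_id_cons] at e1
      simpa [List.foldl, max_assoc] using e1.symm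
    rw [e1]; dsimp only
    rw [e2]; dsimp only
    rw [e3]; dsimp only
    rw [hset]
    rw [getD_set_self _ _ _ (by simp; omega)]
    simp [show List.range 4 = [0,1,2,3] from rfl, List.foldl, stepB, bestOther,
      List.filter, List.map, PySem.List.max?_id_cons, List.set, List.getD]
    omega
  · by_cases h1 : a ≤ b ∧ c ≤ b ∧ d ≤ b
    · have hab : a ≠ b := by omega
      have hM : List.foldl max a [b,c,d] = b := by simp [List.foldl]; omega
      rw [hM]
      dsimp only
      rw [PySem.List.index?_cons_of_ne _ hab, PySem.List.index?_cons_self]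
      simp only [Option.map_some]
      norm_num
      rw [show PySem.List.pop? [a,b,c,d] (1 : Int) = some (b, [a,c,d]) by
        have h := PySem.List.pop?_natCast [a,b,c,d] 1 (by simp)
        simpa using h]
      dsimp only
      obtain ⟨M2, mi2, rest, e1, e2, e3⟩ := pop_index_max [a,c,d] (by simp)
      have hM2 : M2 = max (max a c) d := by
        rw [PySem.List.max?_id_cons] at e1
        simpa [List.foldl, max_assoc] using e1.symm
      rw [PySem.List.index?_eq_idxOf?] at e2
      rw [e1]; dsimp only
      rw [e2]; dsimp only
      rw [e3]; dsimp only
      simp only [← List.getD_eq_getElem?_getD]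
      rw [hnext]
      rw [getD_set_self _ _ _ (by simp; omega)]
      simp [show List.range 4 = [0,1,2,3] from rfl, List.foldl, stepB, bestOther,
        List.filter, List.map, PySem.List.max?_id_cons, List.set, List.getD]
      omega
    · by_cases h2 : a ≤ c ∧ b ≤ c ∧ d ≤ c
      · have hac : a ≠ c := by omega
        have hbc : b ≠ c := by omega
        have hM : List.foldl max a [b,c,d] = c := by simp [List.foldl]; omega
        rw [hM]
        dsimp only
        rw [PySem.List.index?_cons_of_ne _ hac, PySem.List.index?_cons_of_ne _ hbc,
          PySem.List.index?_cons_self]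
        simp only [Option.map_some]
        norm_num
        rw [show PySem.List.pop? [a,b,c,d] (2 : Int) = some (c, [a,b,d]) by
          have h := PySem.List.pop?_natCast [a,b,c,d] 2 (by simp)
          simpa using h]
        dsimp only
        obtain ⟨M2, mi2, rest, e1, e2, e3⟩ := pop_index_max [a,b,d] (by simp)
        have hM2 : M2 = max (max a b) d := by
          rw [PySem.List.max?_id_cons] at e1
          simpa [List.foldl, max_assoc] using e1.symm
        rw [PySem.List.index?_eq_idxOf?] at e2
        rw [e1]; dsimp only
        rw [e2]; dsimp only
        rw [e3]; dsimp only
        simp only [← List.getD_eq_getElem?_getD]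
        rw [hnext]
        rw [getD_set_self _ _ _ (by simp; omega)]
        simp [show List.range 4 = [0,1,2,3] from rfl, List.foldl, stepB, bestOther,
          List.filter, List.map, PySem.List.max?_id_cons, List.set, List.getD]
        omega
      · have had : a ≠ d := by omega
        have hbd : b ≠ d := by omega
        have hcd : c ≠ d := by omega
        have hM : List.foldl max a [b,c,d] = d := by simp [List.foldl]; omega
        rw [hM]
        dsimp only
        rw [PySem.List.index?_cons_of_ne _ had, PySem.List.index?_cons_of_ne _ hbd,
          PySem.List.index?_cons_of_ne _ hcd, PySem.List.index?_cons_self]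
        simp only [Option.map_some]
        norm_num
        rw [show PySem.List.pop? [a,b,c,d] (3 : Int) = some (d, [a,b,c]) by
          have h := PySem.List.pop?_natCast [a,b,c,d] 3 (by simp)
          simpa using h]
        dsimp only
        obtain ⟨M2, mi2, rest, e1, e2, e3⟩ := pop_index_max [a,b,c] (by simp)
        have hM2 : M2 = max (max a b) c := by
          rw [PySem.List.max?_id_cons] at e1
          simpa [List.foldl, max_assoc] using e1.symm
        rw [PySem.List.index?_eq_idxOf?] at e2
        rw [e1]; dsimp only
        rw [e2]; dsimp only
        rw [e3]; dsimp only
        simp only [← List.getD_eq_getElem?_getD]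
        rw [hnext]
        rw [getD_set_self _ _ _ (by simp; omega)]
        simp [show List.range 4 = [0,1,2,3] from rfl, List.foldl, stepB, bestOther,
          List.filter, List.map, PySem.List.max?_id_cons, List.set, List.getD]
        omega

theorem stepB_length (dp row : List Int) : (stepB dp row).length = 4 := by simp [stepB]

theorem len4 (l : List Int) (h : l.length = 4) : ∃ a b c d, l = [a, b, c, d] := by
  match l, h with
  | [a, b, c, d], _ => exact ⟨a, b, c, d, rfl⟩

theorem foldl_stepB_length (rows : List (List Int)) (r0 : List Int) (h : r0.length = 4) :
    (rows.foldl stepB r0).length = 4 := by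
  induction rows generalizing r0 with
  | nil => exact h
  | cons r rs ih => exact ih _ (stepB_length _ _)

theorem getD_mem (l : List (List Int)) (j : Nat) (h : j < l.length) : l.getD j [] ∈ l := by
  rw [List.getD_eq_getElem?_getD, List.getElem?_eq_getElem h]
  exact List.getElem_mem h

theorem invA (land : List (List Int)) (h4 : ∀ r ∈ land, r.length = 4) (hne : land ≠ []) :
    ∀ k, k + 1 ≤ land.length →
      ((List.range k).foldl stepA land).length = land.length ∧
      (∀ j, k < j → ((List.range k).foldl stepA land).getD j [] = land.getD j []) ∧
      ((List.range k).foldl stepA land).getD k []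
        = ((land.drop 1).take k).foldl stepB (land.getD 0 []) := by
  intro k
  induction k with
  | zero => intro _; exact ⟨rfl, fun j _ => rfl, by simp⟩
  | succ k ih =>
    intro hk
    obtain ⟨hlen, hgt, hdp⟩ := ih (by omega)
    have hfold : (List.range (k+1)).foldl stepA land
        = stepA ((List.range k).foldl stepA land) k := by
      rw [List.range_succ, List.foldl_append]; rfl
    have h0len : (land.getD 0 []).length = 4 :=
      h4 _ (getD_mem land 0 (by cases land <;> simp_all))
    have hdplen : (((land.drop 1).take k).foldl stepB (land.getD 0 [])).length = 4 :=
      foldl_stepB_length _ _ h0len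
    obtain ⟨a, b, c, d, habcd⟩ := len4 _ (hdp ▸ hdplen)
    have hnextlen : (land.getD (k+1) []).length = 4 :=
      h4 _ (getD_mem land (k+1) (by omega))
    obtain ⟨p, q, s, t, hpqst⟩ := len4 _ ((hgt (k+1) (by omega)) ▸ hnextlen)
    have hstep := stepA_next ((List.range k).foldl stepA land) k a b c d p q s t
      habcd hpqst (by omega)
    refine ⟨by rw [hfold, stepA_length, hlen], ?_, ?_⟩
    · intro j hj
      rw [hfold, stepA_getD_gt _ _ _ (by omega) (by omega)]
      exact hgt j (by omega)
    · rw [hfold, hstep]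
      have htake : (land.drop 1).take (k+1)
          = (land.drop 1).take k ++ [land.getD (k+1) []] := by
        have hklt : k < (land.drop 1).length := by simp; omega
        rw [List.take_add_one, List.getElem?_eq_getElem hklt]
        simp [List.getD_eq_getElem?_getD,
          List.getElem?_eq_getElem (show k + 1 < land.length by omega)]
      have hl : land.getD (k+1) [] = [p, q, s, t] := by
        rw [← hgt (k+1) (by omega), hpqst]
      rw [htake, List.foldl_append, hl, ← hdp, habcd]
      simp [List.foldl]

theorem main_eq (land : List (List Int)) (hne : land ≠ [])
    (h4 : ∀ r ∈ land, r.length = 4) : solution land = solution_alt land := by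
  obtain ⟨-, -, hdp⟩ := invA land h4 hne (land.length - 1)
    (by cases land <;> simp_all)
  have htake : (land.drop 1).take (land.length - 1) = land.drop 1 := by
    apply List.take_of_length_le; simp
  cases land with
  | nil => exact absurd rfl hne
  | cons r0 rest =>
    rw [htake] at hdp
    simp only [solution, solution_alt]
    rw [hdp]
    simp

-- ===== VERDICT (by name: the statement is the Claim_ definition above) =====
theorem solution_spec : Claim_equal_solution := by
  intro land _ hpre
  obtain ⟨hne, -, h4⟩ := hpre
  match land, hne with
  | [r], _ => simp [Spec_solution, solution, solution_alt]
  | r0 :: r1 :: rest, _ =>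
      exact main_eq _ (by simp) (h4 (by simp))
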